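-- pv_equiv track=rewrite | github.com/usc-psychsim/psychsim-eval-gui | ui/DiffResultsWindow.py | get_diff_table_rows
-- ===== SOURCE A (Python) =====
-- def get_diff_table_rows(diff):
--     """
--     Sort the lines of the diff for a specific table
--     :return: lists with elements corresponding to table rows
--     """
--     diff_rows1 = []
--     diff_info1 = []
--     diff_rows2 = []
--     diff_info2 = []
--     for line_no, line in enumerate(diff):
--         if line[0].startswith(" "):
--             diff_rows1.append(line)
--             diff_rows2.append(line)
--             diff_info1.append([])
--             diff_info2.append([])
--         elif line[0].startswith("-"):
--             diff_rows1.append(line)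
--             # if next line exists AND starts with '?' then also append to info list
--             if line_no >= 0 and line_no + 1 < len(diff) and diff[line_no + 1][0].startswith("?"): #TODO: CLEAN THIS UP COS IT'S CONFUSING
--                 diff_info1.append(diff[line_no + 1])
--             elif line_no >= 0 and line_no + 1 < len(diff) and not diff[line_no + 1][0].startswith("?"): #TODO: CLEAN THIS UP COS IT'S CONFUSING
--                 diff_info1.append([])
--             elif line_no >= 0 and line_no + 1 == len(diff):
--                 diff_info1.append([])
--         elif line[0].startswith("+"):
--             diff_rows2.append(line)
--             if line_no >= 0 and line_no + 1 < len(diff) and diff[line_no + 1][0].startswith("?"):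
--                 diff_info2.append(diff[line_no + 1])
--             elif line_no >= 0 and line_no + 1 < len(diff) and not diff[line_no + 1][0].startswith("?"):
--                 diff_info2.append([])
--             elif line_no >= 0 and line_no + 1 == len(diff):
--                 diff_info2.append([])
--
--     return dict(rows=diff_rows1, info=diff_info1), dict(rows=diff_rows2, info=diff_info2)
-- ===== SOURCE B (Python) =====
-- def get_diff_table_rows(diff):
--     """
--     Sort the lines of the diff for a specific table
--     :return: lists with elements corresponding to table rows
--     """
--     rows1, info1, rows2, info2 = [], [], [], []
--     prev = ""  # marker kind of the previous line: " ", "-", "+", "?" or ""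
--     for line in diff:
--         head = line[0]
--         if head.startswith(" "):
--             rows1.append(line)
--             info1.append([])
--             rows2.append(line)
--             info2.append([])
--             prev = " "
--         elif head.startswith("-"):
--             rows1.append(line)
--             info1.append([])
--             prev = "-"
--         elif head.startswith("+"):
--             rows2.append(line)
--             info2.append([])
--             prev = "+"
--         elif head.startswith("?"):
--             if prev == "-":
--                 info1[-1] = line
--             elif prev == "+":
--                 info2[-1] = line
--             prev = "?"
--         else:
--             prev = ""
--     return dict(rows=rows1, info=info1), dict(rows=rows2, info=info2)
-- ===== Notes on version B (the rewrite author's own statement) =====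
-- stated objective: simpler
-- what changed: Replaces A's index-based loop with lookahead (diff[line_no+1]) and its three confusing elif arms by a single plain pass that appends an empty-placeholder info entry and, on a '?' line, back-patches the previous '-'/'+' row's info entry using a one-variable previous-marker state.
import Mathlib
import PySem

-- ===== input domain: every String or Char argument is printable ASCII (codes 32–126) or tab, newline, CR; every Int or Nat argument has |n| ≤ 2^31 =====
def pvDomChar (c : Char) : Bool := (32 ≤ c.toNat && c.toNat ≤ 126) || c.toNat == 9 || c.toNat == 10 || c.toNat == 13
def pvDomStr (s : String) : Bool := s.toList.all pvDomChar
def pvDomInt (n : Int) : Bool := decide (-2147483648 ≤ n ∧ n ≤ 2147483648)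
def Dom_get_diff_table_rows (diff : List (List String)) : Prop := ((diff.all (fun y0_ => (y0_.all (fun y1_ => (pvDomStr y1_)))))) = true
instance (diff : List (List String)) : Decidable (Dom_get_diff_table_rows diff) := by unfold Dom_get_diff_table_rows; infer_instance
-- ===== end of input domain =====

-- B replaces A's indexed loop with '?'-lookahead by a single forward pass that
-- back-patches the previous '-'/'+' row's info entry (simpler decomposition, same cost).


-- loop state shared by both ports: the four accumulating lists
structure DState where
  r1 : List (List String)
  i1 : List (List String)
  r2 : List (List String)
  i2 : List (List String)
deriving Repr, DecidableEq

-- line[0] (exact under Pre_: every line has a first cell; otherwise Python raises IndexError)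
def pvLineHead (line : List String) : String := (PySem.List.pyGet? line 0).getD ""

-- ===== PORT A =====
-- diff[i][0] (the guarded lookahead index is always in range, so getD is exact there)
def pvIdxHead (diff : List (List String)) (i : Int) : String :=
  pvLineHead ((PySem.List.pyGet? diff i).getD [])

-- body of A's 'for line_no, line in enumerate(diff)' loop, branch for branch
def pvAStep (diff : List (List String)) (s : DState) (p : Int × List String) : DState :=
  let line_no := p.1
  let line := p.2
  let h0 := pvLineHead line
  if PySem.Str.startswith h0 " " then
    ⟨s.r1 ++ [line], s.i1 ++ [[]], s.r2 ++ [line], s.i2 ++ [[]]⟩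
  else if PySem.Str.startswith h0 "-" then
    let s := { s with r1 := s.r1 ++ [line] }
    if line_no ≥ 0 ∧ line_no + 1 < PySem.List.len diff ∧
        PySem.Str.startswith (pvIdxHead diff (line_no + 1)) "?" then
      { s with i1 := s.i1 ++ [(PySem.List.pyGet? diff (line_no + 1)).getD []] }
    else if line_no ≥ 0 ∧ line_no + 1 < PySem.List.len diff ∧
        ¬ PySem.Str.startswith (pvIdxHead diff (line_no + 1)) "?" then
      { s with i1 := s.i1 ++ [[]] }
    else if line_no ≥ 0 ∧ line_no + 1 = PySem.List.len diff then
      { s with i1 := s.i1 ++ [[]] }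
    else s
  else if PySem.Str.startswith h0 "+" then
    let s := { s with r2 := s.r2 ++ [line] }
    if line_no ≥ 0 ∧ line_no + 1 < PySem.List.len diff ∧
        PySem.Str.startswith (pvIdxHead diff (line_no + 1)) "?" then
      { s with i2 := s.i2 ++ [(PySem.List.pyGet? diff (line_no + 1)).getD []] }
    else if line_no ≥ 0 ∧ line_no + 1 < PySem.List.len diff ∧
        ¬ PySem.Str.startswith (pvIdxHead diff (line_no + 1)) "?" then
      { s with i2 := s.i2 ++ [[]] }
    else if line_no ≥ 0 ∧ line_no + 1 = PySem.List.len diff then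
      { s with i2 := s.i2 ++ [[]] }
    else s
  else s

def get_diff_table_rows (diff : List (List String)) :
    (List (String × List (List String))) × (List (String × List (List String))) :=
  let s := (PySem.List.enumerate diff).foldl (pvAStep diff) ⟨[], [], [], []⟩
  ([("rows", s.r1), ("info", s.i1)], [("rows", s.r2), ("info", s.i2)])

-- ===== PORT B =====
-- body of B's 'for line in diff' loop; second component is B's 'prev' marker variable
def pvBStep (sp : DState × String) (line : List String) : DState × String :=
  let s := sp.1
  let prev := sp.2
  let head := pvLineHead line
  if PySem.Str.startswith head " " then
    (⟨s.r1 ++ [line], s.i1 ++ [[]], s.r2 ++ [line], s.i2 ++ [[]]⟩, " ")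
  else if PySem.Str.startswith head "-" then
    ({ s with r1 := s.r1 ++ [line], i1 := s.i1 ++ [[]] }, "-")
  else if PySem.Str.startswith head "+" then
    ({ s with r2 := s.r2 ++ [line], i2 := s.i2 ++ [[]] }, "+")
  else if PySem.Str.startswith head "?" then
    if prev == "-" then ({ s with i1 := PySem.List.pySetD s.i1 (-1) line }, "?")
    else if prev == "+" then ({ s with i2 := PySem.List.pySetD s.i2 (-1) line }, "?")
    else (s, "?")
  else (s, "")

def get_diff_table_rows_alt (diff : List (List String)) :
    (List (String × List (List String))) × (List (String × List (List String))) :=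
  let s := (diff.foldl pvBStep (⟨[], [], [], []⟩, "")).1
  ([("rows", s.r1), ("info", s.i1)], [("rows", s.r2), ("info", s.i2)])

-- ===== PRECONDITION & SPEC =====
-- Pre_ excludes exactly the diffs in which some line has no cells, where the Python A raises IndexError at line[0].
def Pre_get_diff_table_rows (diff : List (List String)) : Prop := ∀ line ∈ diff, line ≠ []
instance (diff : List (List String)) : Decidable (Pre_get_diff_table_rows diff) := by unfold Pre_get_diff_table_rows; infer_instance

def pvWitness_get_diff_table_rows : List (List String) :=
  [["- a", "1"], ["?  ^", ""], ["  b", "2"], ["+ c", "3"]]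

def Spec_get_diff_table_rows (diff : List (List String)) (out : (List (String × List (List String))) × (List (String × List (List String)))) : Prop := out = get_diff_table_rows_alt diff
instance (diff : List (List String)) (out : (List (String × List (List String))) × (List (String × List (List String)))) : Decidable (Spec_get_diff_table_rows diff out) := by unfold Spec_get_diff_table_rows; infer_instance

-- ===== CLAIM (what is proved, stated in full; the proofs are below) =====
def Claim_equal_get_diff_table_rows : Prop := ∀ (diff : List (List String)), Dom_get_diff_table_rows diff → Pre_get_diff_table_rows diff → Spec_get_diff_table_rows diff (get_diff_table_rows diff)

-- ===== LEMMAS AND PROOFS =====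

-- single-char prefixes are mutually exclusive
theorem pvSW_ne (l : List Char) (c d : Char) (hne : d ≠ c)
    (h : PySem.Chars.startswith l [c] = true) : PySem.Chars.startswith l [d] = false := by
  rw [PySem.Chars.startswith_iff] at h
  rcases h with ⟨t, ht⟩
  simp [← ht, PySem.Chars.startswith, List.isPrefixOf, hne]

-- info[-1] = v on a just-extended list
theorem pvSetD_neg_one (xs : List (List String)) (x v : List String) :
    PySem.List.pySetD (xs ++ [x]) (-1) v = xs ++ [v] := by
  simp [PySem.List.pySetD, PySem.List.pySet?, PySem.List.pyIdx?]

-- A's loop rewritten structurally: lookahead diff[line_no+1] is the head of the rest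
def pvANext (next : Option (List String)) : List String :=
  match next with
  | some n => if PySem.Str.startswith (pvLineHead n) "?" then n else []
  | none => []

def pvAStepR (line : List String) (next : Option (List String)) (s : DState) : DState :=
  let h0 := pvLineHead line
  if PySem.Str.startswith h0 " " then
    ⟨s.r1 ++ [line], s.i1 ++ [[]], s.r2 ++ [line], s.i2 ++ [[]]⟩
  else if PySem.Str.startswith h0 "-" then
    { s with r1 := s.r1 ++ [line], i1 := s.i1 ++ [pvANext next] }
  else if PySem.Str.startswith h0 "+" then
    { s with r2 := s.r2 ++ [line], i2 := s.i2 ++ [pvANext next] }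
  else s

def pvARec : List (List String) → DState → DState
  | [], s => s
  | h :: rest, s => pvARec rest (pvAStepR h rest.head? s)

-- A's indexed fold over a suffix (indices from pre.length) equals the structural recursion
theorem pvAStep_bridge (suf pre : List (List String)) (s : DState) :
    (PySem.List.enumerate suf (pre.length : Int)).foldl (pvAStep (pre ++ suf)) s
      = pvARec suf s := by
  induction suf generalizing pre s with
  | nil => simp [pvARec, PySem.List.enumerate_nil]
  | cons h rest ih =>
    rw [PySem.List.enumerate_cons]
    simp only [List.foldl_cons, pvARec]
    have hstep : pvAStep (pre ++ h :: rest) s ((pre.length : Int), h)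
        = pvAStepR h rest.head? s := by
      have hget : PySem.List.pyGet? (pre ++ h :: rest) ((pre.length : Int) + 1)
          = rest[0]? := by
        have := PySem.List.pyGet?_append_right (pre := pre) (ys := h :: rest) (k := 1)
        simpa using this
      cases rest with
      | nil =>
        have hlen : PySem.List.len (pre ++ [h]) = (pre.length : Int) + 1 := by
          simp [PySem.List.len_eq]
        simp [pvAStep, pvAStepR, pvANext, hlen]
      | cons m rest2 =>
        have hlt : (pre.length : Int) + 1 < PySem.List.len (pre ++ h :: m :: rest2) := by
          simp [PySem.List.len_eq]
        simp only [List.getElem?_cons_zero] at hget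
        by_cases hq : PySem.Chars.startswith (pvLineHead m).toList ['?'] = true <;>
          simp [pvAStep, pvAStepR, pvANext, hget, pvIdxHead, hq]
    rw [hstep]
    have hcast : (pre.length : Int) + 1 = ((pre ++ [h]).length : Int) := by
      simp
    rw [hcast]
    have := ih (pre := pre ++ [h]) (s := pvAStepR h rest.head? s)
    simpa using this

-- what A's state already holds where B still has a placeholder: if the previous row was
-- '-' ('+') and the next line starts with '?', that line sits in the last info1 (info2) slot
def pvFix (t : String) (next : Option (List String)) (s : DState) : DState :=
  match next with
  | some n =>
    if PySem.Str.startswith (pvLineHead n) "?" then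
      if t == "-" then { s with i1 := PySem.List.pySetD s.i1 (-1) n }
      else if t == "+" then { s with i2 := PySem.List.pySetD s.i2 (-1) n }
      else s
    else s
  | none => s

theorem pvFix_empty (next : Option (List String)) (s : DState) : pvFix "" next s = s := by
  cases next <;> simp [pvFix]

-- one step of B, then the fix, equals the fix, then one step of A
theorem pvStepEq (h : List String) (next : Option (List String)) (s : DState) (t : String) :
    pvFix (pvBStep (s, t) h).2 next (pvBStep (s, t) h).1
      = pvAStepR h next (pvFix t (some h) s) := by
  by_cases hsp : PySem.Chars.startswith (pvLineHead h).toList [' '] = true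
  · have hq := pvSW_ne (pvLineHead h).toList ' ' '?' (by decide) hsp
    cases next with
    | none => simp [pvBStep, pvAStepR, pvFix, hsp, hq]
    | some n =>
      by_cases hn : PySem.Chars.startswith (pvLineHead n).toList ['?'] = true <;>
        simp [pvBStep, pvAStepR, pvFix, hsp, hq, hn]
  · by_cases hd : PySem.Chars.startswith (pvLineHead h).toList ['-'] = true
    · have hq := pvSW_ne (pvLineHead h).toList '-' '?' (by decide) hd
      cases next with
      | none => simp [pvBStep, pvAStepR, pvFix, pvANext, hsp, hd, hq]
      | some n =>
        by_cases hn : PySem.Chars.startswith (pvLineHead n).toList ['?'] = true <;>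
          simp [pvBStep, pvAStepR, pvFix, pvANext, hsp, hd, hq, hn, pvSetD_neg_one]
    · by_cases hp : PySem.Chars.startswith (pvLineHead h).toList ['+'] = true
      · have hq := pvSW_ne (pvLineHead h).toList '+' '?' (by decide) hp
        cases next with
        | none => simp [pvBStep, pvAStepR, pvFix, pvANext, hsp, hd, hp, hq]
        | some n =>
          by_cases hn : PySem.Chars.startswith (pvLineHead n).toList ['?'] = true <;>
            simp [pvBStep, pvAStepR, pvFix, pvANext, hsp, hd, hp, hq, hn, pvSetD_neg_one]
      · by_cases hq : PySem.Chars.startswith (pvLineHead h).toList ['?'] = true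
        · by_cases ht1 : t = "-"
          · cases next with
            | none => simp [pvBStep, pvAStepR, pvFix, hsp, hd, hp, hq, ht1]
            | some n =>
              by_cases hn : PySem.Chars.startswith (pvLineHead n).toList ['?'] = true <;>
                simp [pvBStep, pvAStepR, pvFix, hsp, hd, hp, hq, ht1, hn]
          · by_cases ht2 : t = "+"
            · cases next with
              | none => simp [pvBStep, pvAStepR, pvFix, hsp, hd, hp, hq, ht2]
              | some n =>
                by_cases hn : PySem.Chars.startswith (pvLineHead n).toList ['?'] = true <;>
                  simp [pvBStep, pvAStepR, pvFix, hsp, hd, hp, hq, ht2, hn]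
            · cases next with
              | none => simp [pvBStep, pvAStepR, pvFix, hsp, hd, hp, hq, ht1, ht2]
              | some n =>
                by_cases hn : PySem.Chars.startswith (pvLineHead n).toList ['?'] = true <;>
                  simp [pvBStep, pvAStepR, pvFix, hsp, hd, hp, hq, ht1, ht2, hn]
        · cases next with
          | none => simp [pvBStep, pvAStepR, pvFix, hsp, hd, hp, hq]
          | some n =>
            by_cases hn : PySem.Chars.startswith (pvLineHead n).toList ['?'] = true <;>
              simp [pvBStep, pvAStepR, pvFix, hsp, hd, hp, hq, hn]

-- B's fold equals A's recursion on the fixed state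
theorem pvMain (l : List (List String)) (s : DState) (t : String) :
    (l.foldl pvBStep (s, t)).1 = pvARec l (pvFix t l.head? s) := by
  induction l generalizing s t with
  | nil => cases (pvFix t none s) <;> simp [pvARec, pvFix]
  | cons h rest ih =>
    simp only [List.foldl_cons, pvARec, List.head?_cons]
    rw [show pvBStep (s, t) h = ((pvBStep (s, t) h).1, (pvBStep (s, t) h).2) from rfl]
    rw [ih, pvStepEq]

-- ===== VERDICT (by name: the statement is the Claim_ definition above) =====
theorem get_diff_table_rows_spec : Claim_equal_get_diff_table_rows := by
  intro diff _ _
  unfold Spec_get_diff_table_rows get_diff_table_rows get_diff_table_rows_alt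
  have ha := pvAStep_bridge diff [] ⟨[], [], [], []⟩
  have hb := pvMain diff ⟨[], [], [], []⟩ ""
  rw [pvFix_empty] at hb
  simp only [List.nil_append, List.length_nil, Nat.cast_zero] at ha
  rw [ha, hb]
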